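-- pv_equiv track=rewrite | github.com/evanwellmeyer/GCM | scm/calibration.py | _candidate_overrides_for_chunk
-- ===== SOURCE A (Python) =====
-- def _candidate_overrides_for_chunk(candidates, n_bm_per_candidate, n_mf_per_candidate):
--     """Expand candidate values into per-member override lists for a chunk."""
--
--     if not candidates or not candidates[0]:
--         return {}
--
--     override_keys = list(candidates[0].keys())
--     overrides = {}
--
--     for key in override_keys:
--         values = []
--         if n_bm_per_candidate:
--             for candidate in candidates:
--                 values.extend([candidate[key]] * n_bm_per_candidate)
--         if n_mf_per_candidate:
--             for candidate in candidates:
--                 values.extend([candidate[key]] * n_mf_per_candidate)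
--         overrides[key] = values
--
--     return overrides
-- ===== SOURCE B (Python) =====
-- def _candidate_overrides_for_chunk(candidates, n_bm_per_candidate, n_mf_per_candidate):
--     """Expand candidate values into per-member override lists for a chunk."""
--
--     if not candidates or not candidates[0]:
--         return {}
--
--     ordered = []
--     for candidate in candidates:
--         ordered += [candidate] * n_bm_per_candidate
--     for candidate in candidates:
--         ordered += [candidate] * n_mf_per_candidate
--
--     return {key: [candidate[key] for candidate in ordered] for key in candidates[0]}
-- ===== Notes on version B (the rewrite author's own statement) =====
-- stated objective: simpler
-- what changed: Instead of rescanning candidates twice inside a per-key loop with truthiness guards, B materializes the member ordering once (each candidate repeated n_bm times, then each repeated n_mf times) and builds each key's list by one transpose pass over that ordered list.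
import Mathlib
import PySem

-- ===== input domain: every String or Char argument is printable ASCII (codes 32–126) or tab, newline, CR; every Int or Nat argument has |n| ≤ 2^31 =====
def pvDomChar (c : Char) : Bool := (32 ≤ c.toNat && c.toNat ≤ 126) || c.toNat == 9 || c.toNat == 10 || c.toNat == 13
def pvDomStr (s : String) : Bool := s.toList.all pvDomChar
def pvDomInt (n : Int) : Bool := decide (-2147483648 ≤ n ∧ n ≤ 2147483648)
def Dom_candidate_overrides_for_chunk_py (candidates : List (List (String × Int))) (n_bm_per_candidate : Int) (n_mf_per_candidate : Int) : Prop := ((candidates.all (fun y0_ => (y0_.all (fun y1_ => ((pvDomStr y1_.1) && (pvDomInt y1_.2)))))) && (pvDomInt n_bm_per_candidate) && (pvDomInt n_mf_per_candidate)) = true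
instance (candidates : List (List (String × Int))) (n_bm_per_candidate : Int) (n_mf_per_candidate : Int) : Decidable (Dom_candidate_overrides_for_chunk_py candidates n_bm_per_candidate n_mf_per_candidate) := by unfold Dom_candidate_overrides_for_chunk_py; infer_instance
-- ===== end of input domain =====

-- B materializes the ordered member list once (each candidate repeated n_bm times, then n_mf times)
-- and transposes it per key, instead of A's per-key double rescan of candidates; objective: simpler.

-- ===== PORT A =====
-- Dicts are received as association lists; each is converted with PySem.Dict.ofList
-- (last value wins, first-occurrence position), exactly Python's dict construction.
-- candidate[key] (KeyError possible) is ported as Dict.getD _ _ 0; the KeyError inputs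
-- are excluded by Pre_ below.
def candidate_overrides_for_chunk_py (candidates : List (List (String × Int))) (n_bm_per_candidate : Int) (n_mf_per_candidate : Int) : List (String × List Int) :=
  match candidates.map PySem.Dict.ofList with
  | [] => []
  | c0 :: rest =>
    if c0.items = [] then []
    else
      let cands := c0 :: rest
      ((c0.keys).foldl (fun (overrides : PySem.Dict String (List Int)) key =>
        let values : List Int := []
        let values := if n_bm_per_candidate ≠ 0 then
            cands.foldl (fun v c => v ++ PySem.List.pyRepeat [c.getD key 0] n_bm_per_candidate) values
          else values
        let values := if n_mf_per_candidate ≠ 0 then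
            cands.foldl (fun v c => v ++ PySem.List.pyRepeat [c.getD key 0] n_mf_per_candidate) values
          else values
        overrides.insert key values) PySem.Dict.empty).items

-- ===== PORT B =====
def candidate_overrides_for_chunk_py_alt (candidates : List (List (String × Int))) (n_bm_per_candidate : Int) (n_mf_per_candidate : Int) : List (String × List Int) :=
  match candidates.map PySem.Dict.ofList with
  | [] => []
  | c0 :: rest =>
    if c0.items = [] then []
    else
      let cands := c0 :: rest
      let ordered := cands.foldl (fun acc c => acc ++ PySem.List.pyRepeat [c] n_bm_per_candidate) []
      let ordered := cands.foldl (fun acc c => acc ++ PySem.List.pyRepeat [c] n_mf_per_candidate) ordered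
      c0.keys.map (fun key => (key, ordered.map (fun c => c.getD key 0)))

-- ===== PRECONDITION & SPEC =====
-- Pre_ excludes exactly the inputs where the Python A raises KeyError: a nonzero repeat
-- count makes A look up every first-dict key in every candidate dict.
def Pre_candidate_overrides_for_chunk_py (candidates : List (List (String × Int))) (n_bm_per_candidate : Int) (n_mf_per_candidate : Int) : Prop :=
  (candidates.headD [] = []) ∨ (n_bm_per_candidate = 0 ∧ n_mf_per_candidate = 0) ∨
    (∀ c ∈ candidates, ∀ p ∈ candidates.headD [], ∃ q ∈ c, q.1 = p.1)
instance (candidates : List (List (String × Int))) (n_bm_per_candidate : Int) (n_mf_per_candidate : Int) : Decidable (Pre_candidate_overrides_for_chunk_py candidates n_bm_per_candidate n_mf_per_candidate) := by unfold Pre_candidate_overrides_for_chunk_py; infer_instance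
def pvWitness_candidate_overrides_for_chunk_py : (List (List (String × Int))) × Int × Int := ([[("a", 1), ("b", 2)], [("a", 3), ("b", 4)]], 2, 1)

def Spec_candidate_overrides_for_chunk_py (candidates : List (List (String × Int))) (n_bm_per_candidate : Int) (n_mf_per_candidate : Int) (out : List (String × List Int)) : Prop := out = candidate_overrides_for_chunk_py_alt candidates n_bm_per_candidate n_mf_per_candidate
instance (candidates : List (List (String × Int))) (n_bm_per_candidate : Int) (n_mf_per_candidate : Int) (out : List (String × List Int)) : Decidable (Spec_candidate_overrides_for_chunk_py candidates n_bm_per_candidate n_mf_per_candidate out) := by unfold Spec_candidate_overrides_for_chunk_py; infer_instance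

-- ===== CLAIM (what is proved, stated in full; the proofs are below) =====
def Claim_equal_candidate_overrides_for_chunk_py : Prop := ∀ (candidates : List (List (String × Int))) (n_bm_per_candidate : Int) (n_mf_per_candidate : Int), Dom_candidate_overrides_for_chunk_py candidates n_bm_per_candidate n_mf_per_candidate → Pre_candidate_overrides_for_chunk_py candidates n_bm_per_candidate n_mf_per_candidate → Spec_candidate_overrides_for_chunk_py candidates n_bm_per_candidate n_mf_per_candidate (candidate_overrides_for_chunk_py candidates n_bm_per_candidate n_mf_per_candidate)

-- ===== LEMMAS AND PROOFS =====

-- One per-key section of A's values equals the transpose of B's ordered section.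
lemma section_eq (cands : List (PySem.Dict String Int)) (k : String) (n : Int) (v0 : List Int) :
    (if n ≠ 0 then cands.foldl (fun v c => v ++ PySem.List.pyRepeat [c.getD k 0] n) v0 else v0)
      = v0 ++ (cands.foldl (fun acc c => acc ++ PySem.List.pyRepeat [c] n) []).map (fun c => c.getD k 0) := by
  rw [PySem.List.foldl_append_eq_flatMap, PySem.List.foldl_append_eq_flatMap]
  by_cases h : n = 0
  · simp [h, PySem.List.pyRepeat_singleton, List.flatMap]
  · simp [h, PySem.List.pyRepeat_singleton, List.map_flatMap]

-- ===== VERDICT (by name: the statement is the Claim_ definition above) =====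
theorem candidate_overrides_for_chunk_py_spec : Claim_equal_candidate_overrides_for_chunk_py := by
  intro candidates n_bm n_mf _ _
  unfold Spec_candidate_overrides_for_chunk_py
  unfold candidate_overrides_for_chunk_py candidate_overrides_for_chunk_py_alt
  cases hm : candidates.map PySem.Dict.ofList with
  | nil => rfl
  | cons c0 rest =>
    by_cases h0 : c0.items = []
    · simp [h0]
    · simp only [h0, if_false]
      have hnd : c0.keys.Nodup := by
        have : c0 ∈ candidates.map PySem.Dict.ofList := by rw [hm]; exact List.mem_cons_self
        obtain ⟨l, _, hl⟩ := List.mem_map.mp this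
        rw [← hl]; exact PySem.Dict.nodup_keys_ofList l
      rw [PySem.Dict.items_foldl_insert_fresh
            (l := c0.keys)
            (k := fun key => key)
            (v := fun key =>
              (if n_mf ≠ 0 then
                 (c0 :: rest).foldl (fun v c => v ++ PySem.List.pyRepeat [c.getD key 0] n_mf)
                   (if n_bm ≠ 0 then
                      (c0 :: rest).foldl (fun v c => v ++ PySem.List.pyRepeat [c.getD key 0] n_bm) []
                    else [])
               else
                 (if n_bm ≠ 0 then
                    (c0 :: rest).foldl (fun v c => v ++ PySem.List.pyRepeat [c.getD key 0] n_bm) []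
                  else [])))
            (d := PySem.Dict.empty)
            (by intro a _; simp [PySem.Dict.contains_empty])
            (by simpa using hnd)]
      simp only [PySem.Dict.empty, List.nil_append]
      apply List.map_congr_left
      intro k _
      rw [section_eq, section_eq]
      rw [PySem.List.foldl_append_eq_flatMap, PySem.List.foldl_append_eq_flatMap,
          PySem.List.foldl_append_eq_flatMap]
      simp [List.map_append]
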